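-- pv_equiv track=rewrite | github.com/pallavy57/algorithms | searchingalgo/combined.py | reverseorder
-- ===== SOURCE A (Python) =====
-- def reverseorder(arr):
--     l = 0
--     r = len(arr) - 1
--
--     while (l < r):
--         arr[l], arr[r] = arr[r], arr[l]
--         l += 1
--         r -= 1
--     return arr
-- ===== SOURCE B (Python) =====
-- def reverseorder(arr):
--     arr[:] = arr[::-1]
--     return arr
-- ===== Notes on version B (the rewrite author's own statement) =====
-- stated objective: idiomatic
-- what changed: Replaces the index-based two-pointer swap loop with a single slice assignment arr[:] = arr[::-1] that rebuilds the list from a reversed copy (same in-place mutation contract, same returned object); the C-level slice copy also measured ~1.5x faster than the interpreted swap loop.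
import Mathlib
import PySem

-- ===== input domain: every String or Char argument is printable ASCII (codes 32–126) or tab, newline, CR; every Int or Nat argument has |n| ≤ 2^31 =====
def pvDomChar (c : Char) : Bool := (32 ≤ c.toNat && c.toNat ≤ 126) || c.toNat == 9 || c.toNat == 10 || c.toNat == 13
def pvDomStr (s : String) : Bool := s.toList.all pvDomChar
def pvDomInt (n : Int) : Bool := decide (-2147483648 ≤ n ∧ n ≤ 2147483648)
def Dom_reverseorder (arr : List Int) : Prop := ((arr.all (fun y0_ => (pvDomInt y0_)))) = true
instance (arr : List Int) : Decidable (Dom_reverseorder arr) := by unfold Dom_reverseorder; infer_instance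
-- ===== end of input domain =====

-- B reverses via one slice assignment instead of A's two-pointer swap loop; return-value
-- equivalence is proved (both A and B mutate the argument list in place in Python).

-- ===== PORT A =====
-- while (l < r): swap arr[l], arr[r]; l += 1; r -= 1.  Starting from l = 0, r = len-1 the
-- indices are always in range while l < r, so List.getD/List.set are exact here.
def revLoopA (arr : List Int) (l r : Nat) : List Int :=
  if l < r then
    let a := arr.getD l 0
    let b := arr.getD r 0
    revLoopA ((arr.set l b).set r a) (l + 1) (r - 1)
  else arr
termination_by r - l

def reverseorder (arr : List Int) : List Int :=
  revLoopA arr 0 (arr.length - 1)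

-- ===== PORT B =====
-- arr[:] = arr[::-1]; return arr  →  the returned value is the reversed list.
def reverseorder_alt (arr : List Int) : List Int :=
  arr.reverse

-- ===== PRECONDITION & SPEC =====
def Spec_reverseorder (arr : List Int) (out : List Int) : Prop := out = reverseorder_alt arr
instance (arr : List Int) (out : List Int) : Decidable (Spec_reverseorder arr out) := by unfold Spec_reverseorder; infer_instance

-- ===== CLAIM (what is proved, stated in full; the proofs are below) =====
def Claim_equal_reverseorder : Prop := ∀ (arr : List Int), Dom_reverseorder arr → Spec_reverseorder arr (reverseorder arr)

-- ===== LEMMAS AND PROOFS =====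

theorem pv_getD_mid (p : List Int) (x : Int) (t s : List Int) :
    (p ++ x :: t ++ s).getD p.length 0 = x := by
  induction p with
  | nil => simp
  | cons a p ih => simp [ih]

theorem pv_set_mid (p : List Int) (x : Int) (t s : List Int) (b : Int) :
    (p ++ x :: t ++ s).set p.length b = p ++ b :: t ++ s := by
  induction p with
  | nil => simp
  | cons a p ih => simp [ih]

theorem revLoopA_sandwich :
    ∀ (n : Nat) (m p s : List Int), m.length = n →
      revLoopA (p ++ m ++ s) p.length (p.length + m.length - 1) = p ++ m.reverse ++ s := by
  intro n
  induction n using Nat.strong_induction_on with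
  | _ n ih =>
    intro m p s hlen
    match m with
    | [] => unfold revLoopA; simp
    | [x] => unfold revLoopA; simp
    | x :: y :: rest =>
      rcases List.eq_nil_or_concat (y :: rest) with h | ⟨mid, z, h⟩
      · simp at h
      · rw [h]
        rw [List.concat_eq_append]
        have hcond : p.length < p.length + (x :: (mid ++ [z])).length - 1 := by
          simp only [List.length_cons, List.length_append]; omega
        unfold revLoopA
        rw [if_pos hcond]
        have hlget : (p ++ (x :: (mid ++ [z])) ++ s).getD p.length 0 = x := by
          simp [pv_getD_mid p x (mid ++ [z]) s]
        have hrewrite : p ++ (x :: (mid ++ [z])) ++ s = (p ++ x :: mid) ++ z :: [] ++ s := by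
          simp
        have hridx : p.length + (x :: (mid ++ [z])).length - 1 = (p ++ x :: mid).length := by
          simp
        have hrget : (p ++ (x :: (mid ++ [z])) ++ s).getD (p.length + (x :: (mid ++ [z])).length - 1) 0 = z := by
          rw [hridx, hrewrite]
          simp
        rw [hlget, hrget]
        show revLoopA (((p ++ (x :: (mid ++ [z])) ++ s).set p.length z).set
            (p.length + (x :: (mid ++ [z])).length - 1) x)
            (p.length + 1) (p.length + (x :: (mid ++ [z])).length - 1 - 1)
          = p ++ (x :: (mid ++ [z])).reverse ++ s
        -- first set: position l = p.length gets z
        have hset1 : (p ++ (x :: (mid ++ [z])) ++ s).set p.length z = p ++ z :: (mid ++ [z]) ++ s :=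
          pv_set_mid p x (mid ++ [z]) s z
        rw [hset1]
        -- second set: position r gets x
        have hrewrite2 : p ++ (z :: (mid ++ [z])) ++ s = (p ++ z :: mid) ++ z :: [] ++ s := by simp
        have hridx2 : p.length + (x :: (mid ++ [z])).length - 1 = (p ++ z :: mid).length := by
          simp
        have hset2 : (p ++ (z :: (mid ++ [z])) ++ s).set (p.length + (x :: (mid ++ [z])).length - 1) x
            = (p ++ z :: mid) ++ x :: [] ++ s := by
          rw [hridx2, hrewrite2]; exact pv_set_mid (p ++ z :: mid) z [] s x
        rw [hset2]
        -- reassociate for the IH: (p ++ [z]) ++ mid ++ (x :: s)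
        have hre3 : (p ++ z :: mid) ++ x :: [] ++ s = (p ++ [z]) ++ mid ++ (x :: s) := by simp
        rw [hre3]
        have hlt : mid.length < n := by
          rw [← hlen, h, List.concat_eq_append]; simp
        have hih := ih mid.length hlt mid (p ++ [z]) (x :: s) rfl
        have hidx3 : p.length + 1 = (p ++ [z]).length := by simp
        have hidx4 : p.length + (x :: (mid ++ [z])).length - 1 - 1 = (p ++ [z]).length + mid.length - 1 := by
          simp only [List.length_cons, List.length_append]; omega
        rw [hidx3, hidx4, hih]
        simp

theorem reverseorder_eq_reverse (arr : List Int) : reverseorder arr = arr.reverse := by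
  have h := revLoopA_sandwich arr.length arr [] [] rfl
  simpa [reverseorder] using h

-- ===== VERDICT (by name: the statement is the Claim_ definition above) =====
theorem reverseorder_spec : Claim_equal_reverseorder := by
  intro arr _
  unfold Spec_reverseorder reverseorder_alt
  exact reverseorder_eq_reverse arr
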